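-- pv_equiv track=rewrite | github.com/devpruthvi/ds_algo | ds/arrays/min_swaps_to_bring_together.py | find_min_swaps
-- ===== SOURCE A (Python) =====
-- def find_min_swaps(l, k):
--     # get window range = num elements <= k
--     min_count = len([x for x in l if x <= k])
--     num_greater = 0
--
--     # calculate initial value for sliding window, we want to check for every window of size min_count , how many number
--     # of elements are greater than k because those are what would be swapped to make them together
--     for i in range(0, min_count):
--         if l[i] > k:
--             num_greater += 1
--
--     # move forward with sliding window and get the window which has mininum number of elements > k ( minimum swaps will
--     # be required
--
--     i = 0
--     j = min_count
--     cur_num_greater = num_greater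
--     while j < len(l):
--         if l[i] > k:
--             cur_num_greater -= 1
--         if l[j] > k:
--             cur_num_greater += 1
--         i += 1
--         j += 1
--         num_greater = min(num_greater, cur_num_greater)
--     return num_greater
-- ===== SOURCE B (Python) =====
-- def find_min_swaps(l, k):
--     # Prefix-sum table: P[i] = number of elements <= k among l[0:i].
--     P = [0]
--     s = 0
--     for x in l:
--         s += x <= k
--         P.append(s)
--     w = s
--     # Minimum over all window starts of the number of elements > k inside
--     # the window of size w (full windows only).
--     return min(w - (P[i + w] - P[i]) for i in range(len(l) - w + 1))
-- ===== Notes on version B (the rewrite author's own statement) =====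
-- stated objective: alternative
-- what changed: A maintains a running >k counter while sliding the window; B precomputes a prefix-sum table of <=k counts in one pass and then takes the minimum of w - (P[i+w]-P[i]) over all window starts.
import Mathlib
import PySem

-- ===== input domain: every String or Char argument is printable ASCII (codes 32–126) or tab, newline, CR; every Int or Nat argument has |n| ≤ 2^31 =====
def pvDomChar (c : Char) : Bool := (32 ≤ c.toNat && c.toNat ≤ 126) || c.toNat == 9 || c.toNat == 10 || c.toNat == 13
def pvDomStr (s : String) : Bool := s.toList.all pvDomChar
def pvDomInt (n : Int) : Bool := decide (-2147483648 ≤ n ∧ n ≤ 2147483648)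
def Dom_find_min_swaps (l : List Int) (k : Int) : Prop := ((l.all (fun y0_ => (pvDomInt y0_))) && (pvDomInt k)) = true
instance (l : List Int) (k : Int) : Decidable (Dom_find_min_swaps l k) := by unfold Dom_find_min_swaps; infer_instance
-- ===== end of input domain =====

-- B replaces A's incrementally maintained sliding-window counter by a prefix-sum
-- table queried once per window start (objective: alternative decomposition, same cost).

-- ===== PORT A =====
-- Literal transliteration of A. All list indices are in range when reached, so
-- Python never raises; pyGetD is exact there. The while loop over j carries
-- (i, num_greater, cur_num_greater) as state.
def find_min_swaps (l : List Int) (k : Int) : Int :=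
  let min_count : Int := ((l.filter (fun x => decide (x ≤ k))).length : Int)
  let num_greater : Int := (PySem.List.pyRange 0 min_count 1).foldl
    (fun acc i => if k < PySem.List.pyGetD l i 0 then acc + 1 else acc) 0
  let st := (PySem.List.pyRange min_count ((l.length : Int)) 1).foldl
    (fun (st : Int × Int × Int) j =>
      let i := st.1
      let ng := st.2.1
      let cur := st.2.2
      let cur := if k < PySem.List.pyGetD l i 0 then cur - 1 else cur
      let cur := if k < PySem.List.pyGetD l j 0 then cur + 1 else cur
      (i + 1, min ng cur, cur))
    (0, num_greater, num_greater)
  st.2.1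

-- ===== PORT B =====
-- Transliteration of Source B: build the prefix-sum table P, then take the minimum
-- over all window starts. The range is never empty (w ≤ len l), so Python's min
-- never raises; `.getD 0` covers only that unreachable none case.
def find_min_swaps_alt (l : List Int) (k : Int) : Int :=
  let st := l.foldl (fun (st : Int × List Int) x =>
      let s := st.1 + (if x ≤ k then (1 : Int) else 0)
      (s, st.2 ++ [s])) ((0 : Int), [(0 : Int)])
  let s := st.1
  let P := st.2
  let w := s
  let vals := (PySem.List.pyRange 0 ((l.length : Int) - w + 1) 1).map
      (fun i => w - (PySem.List.pyGetD P (i + w) 0 - PySem.List.pyGetD P i 0))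
  (PySem.List.min? vals (fun v => v)).getD 0

-- ===== PRECONDITION & SPEC =====
def Spec_find_min_swaps (l : List Int) (k : Int) (out : Int) : Prop := out = find_min_swaps_alt l k
instance (l : List Int) (k : Int) (out : Int) : Decidable (Spec_find_min_swaps l k out) := by unfold Spec_find_min_swaps; infer_instance

-- ===== CLAIM (what is proved, stated in full; the proofs are below) =====
def Claim_equal_find_min_swaps : Prop := ∀ (l : List Int) (k : Int), Dom_find_min_swaps l k → Spec_find_min_swaps l k (find_min_swaps l k)

-- ===== LEMMAS AND PROOFS =====

-- number of elements > k (resp. ≤ k) of a list, as an Int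
def cntGt (k : Int) (t : List Int) : Int := ((t.filter (fun x => decide (k < x))).length : Int)
def cntLe (k : Int) (t : List Int) : Int := ((t.filter (fun x => decide (x ≤ k))).length : Int)

-- the window size: number of elements ≤ k
def wsz (l : List Int) (k : Int) : Nat := (l.filter (fun x => decide (x ≤ k))).length

-- number of elements > k in the window of size wsz starting at i
def gwin (l : List Int) (k : Int) (i : Nat) : Int := cntGt k ((l.drop i).take (wsz l k))

-- running minimum of gwin over window starts 0..m
def gmin (l : List Int) (k : Int) (m : Nat) : Int :=
  ((List.range m).map (fun t => gwin l k (t + 1))).foldl min (gwin l k 0)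

theorem wsz_le_length (l : List Int) (k : Int) : wsz l k ≤ l.length := by
  simpa [wsz] using List.length_filter_le _ l

theorem cnt_partition (k : Int) (t : List Int) : cntLe k t + cntGt k t = (t.length : Int) := by
  unfold cntLe cntGt
  induction t with
  | nil => simp
  | cons x xs ih =>
    by_cases h : x ≤ k
    · simp only [List.filter_cons, h, decide_true, not_lt.mpr h, decide_false,
        if_true, if_false, List.length_cons]
      push_cast; omega
    · simp only [List.filter_cons, h, decide_false, not_le.mp h, decide_true,
        if_true, if_false, List.length_cons]
      push_cast; omega

theorem cntGt_take_add (l : List Int) (k : Int) (i w : Nat) :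
    cntGt k (l.take (i + w)) = cntGt k (l.take i) + cntGt k ((l.drop i).take w) := by
  rw [List.take_add]
  simp [cntGt, List.filter_append]

theorem gwin_eq_take (l : List Int) (k : Int) (i : Nat) :
    gwin l k i = cntGt k (l.take (i + wsz l k)) - cntGt k (l.take i) := by
  rw [cntGt_take_add]; ring_nf; rfl

theorem cntGt_take_succ (l : List Int) (k : Int) (i : Nat) (hi : i < l.length) :
    cntGt k (l.take (i + 1)) = cntGt k (l.take i) + (if k < l.getD i 0 then 1 else 0) := by
  have h1 : l.take (i + 1) = l.take i ++ [l[i]] := by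
    rw [List.take_succ]; simp [List.getElem?_eq_getElem hi]
  have h2 : l.getD i 0 = l[i] := by simp [List.getD_eq_getElem?_getD, List.getElem?_eq_getElem hi]
  rw [h2]
  unfold cntGt
  rw [h1, List.filter_append, List.length_append]
  by_cases h : k < l[i] <;> simp [h]

theorem gwin_step (l : List Int) (k : Int) (m : Nat) (h : wsz l k + m < l.length) :
    gwin l k (m + 1) =
      gwin l k m - (if k < l.getD m 0 then 1 else 0) + (if k < l.getD (wsz l k + m) 0 then 1 else 0) := by
  have hm : m < l.length := by omega
  rw [gwin_eq_take, gwin_eq_take]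
  have e1 : m + 1 + wsz l k = (m + wsz l k) + 1 := by omega
  rw [e1, cntGt_take_succ l k (m + wsz l k) (by omega), cntGt_take_succ l k m hm]
  rw [show wsz l k + m = m + wsz l k from by omega]
  ring

-- A's initial pass equals the > k count over the prefix of length m
theorem A_init (l : List Int) (k : Int) (m : Nat) (hm : m ≤ l.length) (c : Int) :
    (PySem.List.pyRange 0 (m : Int) 1).foldl
      (fun acc i => if k < PySem.List.pyGetD l i 0 then acc + 1 else acc) c
      = c + cntGt k (l.take m) := by
  induction m generalizing c with
  | zero => simp [cntGt]
  | succ m ih =>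
    have hm' : m ≤ l.length := by omega
    have hr : PySem.List.pyRange 0 ((m + 1 : Nat) : Int) 1
        = PySem.List.pyRange 0 (m : Nat) 1 ++ [(m : Int)] := by
      push_cast
      exact PySem.List.pyRange_one_succ_right (by positivity)
    rw [hr, List.foldl_append, ih hm']
    simp only [List.foldl_cons, List.foldl_nil, PySem.List.pyGetD_natCast]
    rw [cntGt_take_succ l k m (by omega)]
    split_ifs <;> ring

-- A's while-loop invariant: after m steps the state is (m, running min, current window count)
theorem A_loop (l : List Int) (k : Int) (m : Nat) (hm : wsz l k + m ≤ l.length) :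
    (PySem.List.pyRange ((wsz l k : Nat) : Int) (((wsz l k : Nat) : Int) + (m : Int)) 1).foldl
      (fun (st : Int × Int × Int) j =>
        let i := st.1
        let ng := st.2.1
        let cur := st.2.2
        let cur := if k < PySem.List.pyGetD l i 0 then cur - 1 else cur
        let cur := if k < PySem.List.pyGetD l j 0 then cur + 1 else cur
        (i + 1, min ng cur, cur))
      (0, gwin l k 0, gwin l k 0)
      = ((m : Int), gmin l k m, gwin l k m) := by
  induction m with
  | zero => simp [PySem.List.pyRange_one_eq_nil, gmin]
  | succ m ih =>
    have hm' : wsz l k + m ≤ l.length := by omega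
    have hr : PySem.List.pyRange ((wsz l k : Nat) : Int) (((wsz l k : Nat) : Int) + ((m + 1 : Nat) : Int)) 1
        = PySem.List.pyRange ((wsz l k : Nat) : Int) (((wsz l k : Nat) : Int) + (m : Int)) 1
          ++ [((wsz l k : Nat) : Int) + (m : Int)] := by
      push_cast
      rw [show ((wsz l k : Int) + ((m : Int) + 1)) = ((wsz l k : Int) + (m : Int)) + 1 from by ring]
      exact PySem.List.pyRange_one_succ_right (by omega)
    rw [hr, List.foldl_append, ih hm']
    simp only [List.foldl_cons, List.foldl_nil]
    have hj : ((wsz l k : Nat) : Int) + (m : Int) = ((wsz l k + m : Nat) : Int) := by push_cast; ring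
    rw [hj, PySem.List.pyGetD_natCast, PySem.List.pyGetD_natCast]
    have hstep := gwin_step l k m (by omega)
    have hcur : (if k < l.getD (wsz l k + m) 0
          then (if k < l.getD m 0 then gwin l k m - 1 else gwin l k m) + 1
          else (if k < l.getD m 0 then gwin l k m - 1 else gwin l k m))
        = gwin l k (m + 1) := by
      rw [hstep]; split_ifs <;> ring
    have hgmin : min (gmin l k m) (gwin l k (m + 1)) = gmin l k (m + 1) := by
      unfold gmin
      rw [List.range_succ, List.map_append, List.foldl_append]
      simp
    simp only [Prod.mk.injEq]
    refine ⟨by push_cast; ring, by rw [hcur, hgmin], hcur⟩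

theorem A_eq (l : List Int) (k : Int) : find_min_swaps l k = gmin l k (l.length - wsz l k) := by
  have hwle := wsz_le_length l k
  show ((PySem.List.pyRange ((wsz l k : Nat) : Int) ((l.length : Int)) 1).foldl
      (fun (st : Int × Int × Int) j =>
        let i := st.1
        let ng := st.2.1
        let cur := st.2.2
        let cur := if k < PySem.List.pyGetD l i 0 then cur - 1 else cur
        let cur := if k < PySem.List.pyGetD l j 0 then cur + 1 else cur
        (i + 1, min ng cur, cur))
      (0, (PySem.List.pyRange 0 ((wsz l k : Nat) : Int) 1).foldl
            (fun acc i => if k < PySem.List.pyGetD l i 0 then acc + 1 else acc) 0,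
          (PySem.List.pyRange 0 ((wsz l k : Nat) : Int) 1).foldl
            (fun acc i => if k < PySem.List.pyGetD l i 0 then acc + 1 else acc) 0)).2.1
    = gmin l k (l.length - wsz l k)
  rw [A_init l k (wsz l k) hwle 0]
  have g0 : (0 : Int) + cntGt k (l.take (wsz l k)) = gwin l k 0 := by
    rw [zero_add]; rfl
  rw [g0]
  have hlen : ((l.length : Int)) = ((wsz l k : Nat) : Int) + ((l.length - wsz l k : Nat) : Int) := by
    omega
  rw [hlen, A_loop l k (l.length - wsz l k) (by omega)]

theorem min?_cons (v : Int) (rest : List Int) :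
    PySem.List.min? (v :: rest) (fun x => x) = some (rest.foldl min v) := by
  induction rest generalizing v with
  | nil => rfl
  | cons x xs ih =>
    have h1 : PySem.List.min? (v :: x :: xs) (fun y : Int => y)
        = PySem.List.min? ((if x < v then x else v) :: xs) (fun y : Int => y) := by
      by_cases hx : x < v <;> simp [PySem.List.min?, hx]
    rw [h1, ih]
    congr 1
    rw [List.foldl_cons]
    congr 1
    by_cases hx : x < v
    · rw [if_pos hx, min_eq_right (le_of_lt hx)]
    · rw [if_neg hx, min_eq_left (not_lt.mp hx)]

theorem cntLe_cons (k x : Int) (xs : List Int) :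
    cntLe k (x :: xs) = (if x ≤ k then (1 : Int) else 0) + cntLe k xs := by
  unfold cntLe
  by_cases h : x ≤ k <;> simp [h] <;> push_cast <;> ring

-- B's prefix-table fold, characterized with a general accumulator
theorem B_fold (l : List Int) (k : Int) (c : Int) (acc : List Int) :
    l.foldl (fun (st : Int × List Int) x =>
        let s := st.1 + (if x ≤ k then (1 : Int) else 0)
        (s, st.2 ++ [s])) (c, acc)
      = (c + cntLe k l, acc ++ (List.range l.length).map (fun i => c + cntLe k (l.take (i + 1)))) := by
  induction l generalizing c acc with
  | nil => simp [cntLe]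
  | cons x xs ih =>
    simp only [List.foldl_cons]
    rw [ih]
    set b : Int := if x ≤ k then (1 : Int) else 0 with hb
    have hx : cntLe k (x :: xs) = b + cntLe k xs := cntLe_cons k x xs
    simp only [Prod.mk.injEq]
    constructor
    · rw [hx]; ring
    · rw [List.length_cons, List.range_succ_eq_map, List.map_cons, List.map_map]
      rw [List.append_assoc, List.singleton_append]
      apply congrArg
      apply congrArg₂ List.cons
      · show c + b = c + cntLe k ((x :: xs).take (0 + 1))
        have : cntLe k [x] = b := by
          unfold cntLe; by_cases h : x ≤ k <;> simp [h, b]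
        simp [List.take_succ_cons, this]
      · apply List.map_congr_left
        intro i _
        simp only [Function.comp, List.take_succ_cons, cntLe_cons]
        ring

theorem cntLe_take_add (l : List Int) (k : Int) (i w : Nat) :
    cntLe k (l.take (i + w)) = cntLe k (l.take i) + cntLe k ((l.drop i).take w) := by
  rw [List.take_add]
  simp [cntLe, List.filter_append]

-- reading the prefix table at index j
theorem B_getP (l : List Int) (k : Int) (j : Nat) (hj : j ≤ l.length) :
    PySem.List.pyGetD ([(0 : Int)] ++ (List.range l.length).map (fun i => cntLe k (l.take (i + 1)))) ((j : Nat) : Int) 0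
      = cntLe k (l.take j) := by
  rw [PySem.List.pyGetD_natCast, List.singleton_append]
  cases j with
  | zero => simp [cntLe]
  | succ j =>
    have hj' : j < l.length := by omega
    have hlen : j < ((List.range l.length).map (fun i => cntLe k (l.take (i + 1)))).length := by
      simpa using hj'
    rw [List.getD_cons_succ, List.getD_eq_getElem _ _ hlen]
    simp

-- one window value of B equals the > k count of that window
theorem B_val (l : List Int) (k : Int) (t : Nat) (ht : t + wsz l k ≤ l.length) :
    ((wsz l k : Nat) : Int) - (cntLe k (l.take (t + wsz l k)) - cntLe k (l.take t)) = gwin l k t := by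
  rw [cntLe_take_add]
  have hpart := cnt_partition k ((l.drop t).take (wsz l k))
  have hlen : ((l.drop t).take (wsz l k)).length = wsz l k := by
    simp [List.length_take, List.length_drop]; omega
  rw [hlen] at hpart
  unfold gwin
  omega

theorem B_eq (l : List Int) (k : Int) : find_min_swaps_alt l k = gmin l k (l.length - wsz l k) := by
  have hwle := wsz_le_length l k
  unfold find_min_swaps_alt
  rw [B_fold l k 0 [(0 : Int)]]
  have hw : (0 : Int) + cntLe k l = ((wsz l k : Nat) : Int) := by rw [zero_add]; rfl
  rw [hw]
  dsimp only
  have hb : ((l.length : Int)) - ((wsz l k : Nat) : Int) + 1 = ((l.length - wsz l k + 1 : Nat) : Int) := by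
    omega
  rw [hb, PySem.List.pyRange_one]
  have htn : (((l.length - wsz l k + 1 : Nat) : Int) - 0).toNat = l.length - wsz l k + 1 := by omega
  rw [htn, List.map_map]
  have hmap : (List.range (l.length - wsz l k + 1)).map
        ((fun i => ((wsz l k : Nat) : Int) -
            (PySem.List.pyGetD ([(0:Int)] ++ (List.range l.length).map (fun i => (0:Int) + cntLe k (l.take (i + 1)))) (i + ((wsz l k : Nat) : Int)) 0 -
             PySem.List.pyGetD ([(0:Int)] ++ (List.range l.length).map (fun i => (0:Int) + cntLe k (l.take (i + 1)))) i 0)) ∘ (fun t : Nat => (0 : Int) + (t : Int)))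
      = (List.range (l.length - wsz l k + 1)).map (fun t => gwin l k t) := by
    apply List.map_congr_left
    intro t hmem
    have ht : t ≤ l.length - wsz l k := by
      have := List.mem_range.mp hmem; omega
    simp only [Function.comp, zero_add]
    have hcast : (t : Int) + ((wsz l k : Nat) : Int) = (((t + wsz l k : Nat)) : Int) := by push_cast; ring
    rw [hcast, B_getP l k (t + wsz l k) (by omega), B_getP l k t (by omega)]
    exact B_val l k t (by omega)
  rw [hmap]
  rw [List.range_succ_eq_map, List.map_cons, List.map_map]
  rw [min?_cons]
  unfold gmin
  congr 1

-- ===== VERDICT (by name: the statement is the Claim_ definition above) =====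
theorem find_min_swaps_spec : Claim_equal_find_min_swaps := by
  intro l k _
  unfold Spec_find_min_swaps
  rw [A_eq, B_eq]
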